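-- pv_equiv track=rewrite | github.com/abhishek25dh/exp-pipeline | layout_8_step_1.py | build_max_lens
-- ===== SOURCE A (Python) =====
-- import math
--
-- def build_max_lens(total_tokens, min_lens):
--     avg = int(math.ceil(total_tokens / len(min_lens)))
--     base_img = max(6, avg + 2)
--     base_txt = 3   # keep step labels short (≤3 tokens) so they fit in step columns
--     max_lens = [(base_img if i % 2 == 0 else base_txt) for i in range(len(min_lens))]
--     for i in range(len(max_lens)):
--         if max_lens[i] < min_lens[i]:
--             max_lens[i] = min_lens[i]
--
--     img_idxs = [i for i in range(len(max_lens)) if i % 2 == 0]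
--     k = 0
--     while sum(max_lens) < total_tokens:
--         idx = img_idxs[k % len(img_idxs)]
--         max_lens[idx] += 1
--         k += 1
--     return max_lens
-- ===== SOURCE B (Python) =====
-- def build_max_lens(total_tokens, min_lens):
--     n = len(min_lens)
--     avg = -(-total_tokens // n)  # exact ceiling division (A's math.ceil is exact for |total_tokens| <= 2**31)
--     base_img = max(6, avg + 2)
--     lens = [max(base_img if i % 2 == 0 else 3, m) for i, m in enumerate(min_lens)]
--     deficit = total_tokens - sum(lens)
--     if deficit <= 0:
--         return lens
--     num_img = (n + 1) // 2
--     q, r = divmod(deficit, num_img)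
--     return [v + q + (1 if i // 2 < r else 0) if i % 2 == 0 else v
--             for i, v in enumerate(lens)]
-- ===== Notes on version B (the rewrite author's own statement) =====
-- stated objective: alternative
-- what changed: A tops up the image columns one token at a time in a while-loop summing the whole list each pass; B computes the deficit once and distributes it over the even indices in closed form with divmod (quotient to every image column, remainder to the first ones).
import Mathlib
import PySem

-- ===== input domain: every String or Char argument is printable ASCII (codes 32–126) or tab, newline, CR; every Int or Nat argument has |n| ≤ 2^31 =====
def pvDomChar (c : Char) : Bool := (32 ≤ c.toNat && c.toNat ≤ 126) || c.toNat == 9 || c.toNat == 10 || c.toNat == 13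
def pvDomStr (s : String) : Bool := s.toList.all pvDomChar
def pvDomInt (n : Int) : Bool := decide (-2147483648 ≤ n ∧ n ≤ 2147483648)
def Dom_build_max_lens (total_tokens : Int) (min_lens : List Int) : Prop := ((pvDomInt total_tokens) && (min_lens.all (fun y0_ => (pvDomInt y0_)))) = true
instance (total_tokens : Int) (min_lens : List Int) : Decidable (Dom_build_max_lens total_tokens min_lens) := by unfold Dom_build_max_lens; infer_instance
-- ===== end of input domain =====

-- B replaces A's one-token-at-a-time round-robin top-up loop by a single closed-form
-- divmod distribution of the deficit over the even indices.

-- ===== PORT A =====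
-- A's `while sum(max_lens) < total_tokens:` loop.  Each iteration adds exactly 1 to the
-- sum, so the loop runs exactly (total_tokens - sum).toNat times; that value is passed
-- as fuel (a totality guard only: the `lens.sum < total` test is still performed each
-- pass, exactly as in Python).  `max_lens[idx] += 1` is `set idx (getD idx 0 + 1)`.
def pvAloop (total : Int) (imgIdxs : List Nat) : Nat → List Int → Nat → List Int
  | 0, lens, _ => lens
  | fuel+1, lens, k =>
    if lens.sum < total then
      let idx := imgIdxs.getD (k % imgIdxs.length) 0
      pvAloop total imgIdxs fuel (lens.set idx (lens.getD idx 0 + 1)) (k+1)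
    else lens

def build_max_lens (total_tokens : Int) (min_lens : List Int) : List Int :=
  let n := min_lens.length
  -- int(math.ceil(total_tokens / len(min_lens))): exact as ceiling division since
  -- |total_tokens| ≤ 2^31 keeps the float division exactly rounded across integers.
  let avg := -(PySem.Int.floordiv (-total_tokens) (n : Int))
  let base_img := max 6 (avg + 2)
  let base_txt : Int := 3
  let maxLens0 := (List.range n).map (fun i => if i % 2 == 0 then base_img else base_txt)
  -- for i in range(len(max_lens)): if max_lens[i] < min_lens[i]: max_lens[i] = min_lens[i]
  let maxLens := List.zipWith (fun a b => if a < b then b else a) maxLens0 min_lens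
  let imgIdxs := (List.range n).filter (fun i => i % 2 == 0)
  pvAloop total_tokens imgIdxs (total_tokens - maxLens.sum).toNat maxLens 0

-- ===== PORT B =====
def build_max_lens_alt (total_tokens : Int) (min_lens : List Int) : List Int :=
  let n := min_lens.length
  let avg := -(PySem.Int.floordiv (-total_tokens) (n : Int))   -- -(-total_tokens // n)
  let base_img := max 6 (avg + 2)
  let lens := (PySem.List.enumerate min_lens).map
    (fun p => max (if PySem.Int.mod p.1 2 == 0 then base_img else 3) p.2)
  let deficit := total_tokens - lens.sum
  if deficit ≤ 0 then lens
  else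
    let num_img := PySem.Int.floordiv ((n : Int) + 1) 2
    let q := PySem.Int.floordiv deficit num_img
    let r := PySem.Int.mod deficit num_img
    (PySem.List.enumerate lens).map
      (fun p => if PySem.Int.mod p.1 2 == 0
                then p.2 + q + (if PySem.Int.floordiv p.1 2 < r then 1 else 0)
                else p.2)

-- ===== PRECONDITION & SPEC =====
-- Pre_ excludes only min_lens = [], where A raises ZeroDivisionError (len(min_lens) = 0).
def Pre_build_max_lens (total_tokens : Int) (min_lens : List Int) : Prop := min_lens ≠ []
instance (total_tokens : Int) (min_lens : List Int) : Decidable (Pre_build_max_lens total_tokens min_lens) := by unfold Pre_build_max_lens; infer_instance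
def pvWitness_build_max_lens : Int × List Int := (25, [2, 1, 4, 1, 2])

def Spec_build_max_lens (total_tokens : Int) (min_lens : List Int) (out : List Int) : Prop := out = build_max_lens_alt total_tokens min_lens
instance (total_tokens : Int) (min_lens : List Int) (out : List Int) : Decidable (Spec_build_max_lens total_tokens min_lens out) := by unfold Spec_build_max_lens; infer_instance

-- ===== CLAIM (what is proved, stated in full; the proofs are below) =====
def Claim_equal_build_max_lens : Prop := ∀ (total_tokens : Int) (min_lens : List Int), Dom_build_max_lens total_tokens min_lens → Pre_build_max_lens total_tokens min_lens → Spec_build_max_lens total_tokens min_lens (build_max_lens total_tokens min_lens)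

-- ===== LEMMAS AND PROOFS =====

lemma pv_sum_set (l : List Int) (i : Nat) (a : Int) (h : i < l.length) :
    (l.set i a).sum = l.sum - l[i] + a := by
  rw [List.sum_set]
  have h2 := List.sum_take_add_sum_drop l i
  have h3 := List.sum_take_add_sum_drop l (i+1)
  rw [List.sum_take_succ _ _ h] at h3
  simp [h]
  omega

lemma pvAloop_getD (idxs : List Nat) (hne : idxs ≠ []) :
    ∀ (fuel : Nat) (lens : List Int) (k : Nat),
      (∀ j ∈ idxs, j < lens.length) →
      ∀ i : Nat, i < lens.length →
      (pvAloop (lens.sum + fuel) idxs fuel lens k).getD i 0 =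
        lens.getD i 0 + ((List.range fuel).countP
          (fun t => idxs.getD ((k + t) % idxs.length) 0 == i) : Nat) := by
  intro fuel
  induction fuel with
  | zero => intro lens k _ i hi; simp [pvAloop]
  | succ f ih =>
    intro lens k hv i hi
    have hmlen : 0 < idxs.length := List.length_pos_iff.mpr hne
    have hidx_mem : idxs.getD (k % idxs.length) 0 ∈ idxs := by
      rw [List.getD_eq_getElem _ _ (Nat.mod_lt _ hmlen)]
      exact List.getElem_mem _
    have hidx : idxs.getD (k % idxs.length) 0 < lens.length := hv _ hidx_mem
    simp only [pvAloop]
    have hcast : ((f+1 : Nat) : Int) = (f : Int) + 1 := by push_cast; ring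
    rw [hcast]
    have hcond : lens.sum < lens.sum + ((f : Int) + 1) := by omega
    rw [if_pos hcond]
    set idx := idxs.getD (k % idxs.length) 0 with hidxdef
    have hsum : (lens.set idx (lens.getD idx 0 + 1)).sum = lens.sum + 1 := by
      rw [List.getD_eq_getElem _ _ hidx, pv_sum_set _ _ _ hidx]; ring
    have htot : lens.sum + ((f : Int) + 1) = (lens.set idx (lens.getD idx 0 + 1)).sum + f := by
      rw [hsum]; ring
    rw [htot,
      ih (lens.set idx (lens.getD idx 0 + 1)) (k+1)
        (fun j hj => by simpa using hv j hj) i (by simpa using hi)]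
    rw [List.range_succ_eq_map, List.countP_cons, List.countP_map]
    have hcomp : List.countP ((fun t => idxs.getD ((k + t) % idxs.length) 0 == i) ∘ Nat.succ) (List.range f)
        = List.countP (fun a => idxs.getD ((k + 1 + a) % idxs.length) 0 == i) (List.range f) := by
      apply List.countP_congr
      intro a _
      simp only [Function.comp]
      have h : k + Nat.succ a = k + 1 + a := by omega
      rw [h]
    have hset : (lens.set idx (lens.getD idx 0 + 1)).getD i 0 =
        (if idx = i then lens.getD i 0 + 1 else lens.getD i 0) := by
      by_cases h : idx = i
      · subst h; simp [List.getD, hidx]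
      · simp [List.getD, h]
    rw [hset]
    rw [hcomp]
    simp only [Nat.add_zero]
    by_cases hieq : idx = i
    · have hb : (idxs.getD (k % idxs.length) 0 == i) = true := by
        rw [← hidxdef, hieq]; simp
      rw [if_pos hieq]
      simp only [hb, if_true]
      push_cast
      ring
    · have hb : (idxs.getD (k % idxs.length) 0 == i) = false := by
        rw [← hidxdef]; simpa using hieq
      rw [if_neg hieq]
      simp only [hb]
      simp

lemma pvAloop_length (total : Int) (idxs : List Nat) :
    ∀ (fuel : Nat) (lens : List Int) (k : Nat),
      (pvAloop total idxs fuel lens k).length = lens.length := by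
  intro fuel
  induction fuel with
  | zero => intro lens k; rfl
  | succ f ih =>
    intro lens k
    simp only [pvAloop]
    split
    · rw [ih]; simp
    · rfl

-- the even indices of range n, in closed form
lemma pv_filter_even (n : Nat) :
    (List.range n).filter (fun i => i % 2 == 0) = (List.range ((n+1)/2)).map (fun j => 2*j) := by
  induction n with
  | zero => rfl
  | succ n ih =>
    rw [List.range_succ, List.filter_append, ih]
    by_cases h : n % 2 = 0
    · have h1 : (n+1+1)/2 = (n+1)/2 + 1 := by omega
      have h2 : 2 * ((n+1)/2) = n := by omega
      simp [h, h1, List.range_succ, h2]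
    · have h1 : (n+1+1)/2 = (n+1)/2 := by omega
      simp [h, h1]

-- counting round-robin hits: among t < d, how many have t % m = j
lemma pv_count_mod (m j : Nat) (hj : j < m) :
    ∀ d, (List.range d).countP (fun t => t % m == j) =
      d / m + (if j < d % m then 1 else 0) := by
  have hm : 0 < m := by omega
  intro d
  induction d with
  | zero => simp
  | succ d ih =>
    rw [List.range_succ, List.countP_append, ih]
    have hd := Nat.div_add_mod d m
    have hlt : d % m < m := Nat.mod_lt _ hm
    by_cases hc : d % m + 1 = m
    · have hmul : m * (d / m + 1) = m * (d / m) + m := by ring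
      have h1 : d + 1 = m * (d / m + 1) := by omega
      have hdiv : (d+1) / m = d / m + 1 := by rw [h1, Nat.mul_div_cancel_left _ hm]
      have hmod : (d+1) % m = 0 := by rw [h1, Nat.mul_mod_right]
      rw [hdiv, hmod]
      simp only [List.countP_cons, List.countP_nil, beq_iff_eq]
      split_ifs <;> omega
    · have h1 : d + 1 = m * (d / m) + (d % m + 1) := by omega
      have hdiv : (d+1) / m = d / m := by
        have hz : (d % m + 1) / m = 0 := Nat.div_eq_of_lt (by omega)
        rw [h1, Nat.mul_add_div hm, hz]
        omega
      have hmod : (d+1) % m = d % m + 1 := by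
        rw [h1, Nat.mul_add_mod, Nat.mod_eq_of_lt (by omega)]
      rw [hdiv, hmod]
      simp only [List.countP_cons, List.countP_nil, beq_iff_eq]
      split_ifs <;> omega

-- the two ports produce the same base list (before the top-up)
lemma pv_base_eq (bimg : Int) (ml : List Int) :
    List.zipWith (fun a b => if a < b then b else a)
      ((List.range ml.length).map (fun i => if i % 2 == 0 then bimg else 3)) ml
    = (PySem.List.enumerate ml).map
        (fun p => max (if PySem.Int.mod p.1 2 == 0 then bimg else 3) p.2) := by
  apply List.ext_getElem
  · simp
  · intro i h1 h2
    simp only [List.getElem_zipWith, List.getElem_map, List.getElem_range,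
      PySem.List.getElem_enumerate]
    have hc : (PySem.Int.mod ((0:Int) + (i:Int)) 2 == 0) = (i % 2 == 0) := by
      simp; omega
    rw [hc]
    by_cases h : i % 2 = 0 <;> simp [h] <;> omega

-- ===== VERDICT (by name: the statement is the Claim_ definition above) =====
theorem build_max_lens_spec : Claim_equal_build_max_lens := by
  intro t ml hdom hpre
  unfold Spec_build_max_lens build_max_lens build_max_lens_alt
  simp only []
  rw [pv_base_eq]
  set n := ml.length with hn
  set bimg := max 6 (-(PySem.Int.floordiv (-t) (n : Int)) + 2) with hbimg
  set E := (PySem.List.enumerate ml).map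
    (fun p => max (if PySem.Int.mod p.1 2 == 0 then bimg else 3) p.2) with hE
  have hElen : E.length = n := by simp [hE, ← hn]
  set m' := (n+1)/2 with hm'
  have hnpos : 0 < n := by
    have := List.length_pos_iff.mpr hpre
    omega
  have hmpos : 0 < m' := by omega
  by_cases hd : t - E.sum ≤ 0
  · rw [if_pos hd]
    have h0 : (t - E.sum).toNat = 0 := Int.toNat_of_nonpos hd
    rw [h0]
    rfl
  · rw [if_neg hd]
    set d := (t - E.sum).toNat with hdd
    have hdpos : 0 < d := by omega
    have ht : t = E.sum + (d : Nat) := by omega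
    rw [pv_filter_even, ← hm']
    set idxs := (List.range m').map (fun j => 2*j) with hidxs
    have hidxlen : idxs.length = m' := by simp [hidxs]
    have hne : idxs ≠ [] := by
      simp [hidxs]
      omega
    have hv : ∀ j ∈ idxs, j < E.length := by
      intro j hj
      simp [hidxs] at hj
      obtain ⟨a, ha, rfl⟩ := hj
      omega
    have hgetidx : ∀ s : Nat, s < m' → idxs.getD s 0 = 2 * s := by
      intro s hs
      rw [hidxs, List.getD_eq_getElem _ _ (by simpa using hs)]
      simp
    apply List.ext_getElem
    · rw [pvAloop_length]
      simp [hElen]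
    · intro i hL hR
      have hi : i < n := by
        rw [pvAloop_length, hElen] at hL
        exact hL
      have hiE : i < E.length := by omega
      have htd : t - E.sum = ((d : Nat) : Int) := by omega
      rw [← List.getD_eq_getElem _ 0 hL, ← List.getD_eq_getElem _ 0 hR]
      conv_lhs => rw [ht]
      rw [pvAloop_getD idxs hne d E 0 hv i hiE, htd]
      have hgetR : ∀ (f : Int × Int → Int), ((PySem.List.enumerate E).map f).getD i 0
          = f ((i : Int), E[i]'hiE) := by
        intro f
        rw [List.getD_eq_getElem _ _ (by simpa [hElen] using hi)]
        rw [List.getElem_map, PySem.List.getElem_enumerate]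
        norm_num
      rw [hgetR]
      simp only [hidxlen]
      have h3 : PySem.Int.floordiv ((n:Int) + 1) 2 = ((m' : Nat) : Int) := by
        have h2 : ((n:Int) + 1) = ((n+1 : Nat) : Int) := by push_cast; ring
        rw [h2]
        exact_mod_cast PySem.Int.floordiv_natCast (n+1) 2
      have hq : PySem.Int.floordiv ((d:Nat):Int) ((m':Nat):Int) = ((d / m' : Nat) : Int) :=
        PySem.Int.floordiv_natCast d m'
      have hr : PySem.Int.mod ((d:Nat):Int) ((m':Nat):Int) = ((d % m' : Nat) : Int) :=
        PySem.Int.mod_natCast d m'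
      rw [h3, hq, hr]
      have hmod2 : (PySem.Int.mod ((i:Int)) 2 == 0) = (i % 2 == 0) := by
        simp; omega
      rw [hmod2]
      have hdiv2 : PySem.Int.floordiv ((i:Int)) 2 = ((i / 2 : Nat) : Int) := by
        exact_mod_cast PySem.Int.floordiv_natCast i 2
      rw [hdiv2]
      by_cases hpar : i % 2 = 0
      · -- image column: j-th image index, j = i/2
        have hj : i / 2 < m' := by omega
        have hcnt : (List.range d).countP (fun t => idxs.getD ((0 + t) % m') 0 == i)
            = d / m' + (if i / 2 < d % m' then 1 else 0) := by
          rw [← pv_count_mod m' (i/2) hj d]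
          apply List.countP_congr
          intro a ha
          rw [List.mem_range] at ha
          rw [hgetidx _ (Nat.mod_lt _ hmpos)]
          constructor <;> intro h <;> simp only [beq_iff_eq, Nat.zero_add] at h ⊢ <;> omega
        rw [hcnt]
        simp only [hpar, beq_self_eq_true, if_true]
        rw [List.getD_eq_getElem _ _ hiE]
        simp only [Nat.cast_lt]
        split_ifs <;> push_cast <;> ring
      · -- text column: never topped up
        have hcnt : (List.range d).countP (fun t => idxs.getD ((0 + t) % m') 0 == i)
            = 0 := by
          apply List.countP_eq_zero.mpr
          intro a ha
          rw [List.mem_range] at ha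
          rw [hgetidx _ (Nat.mod_lt _ hmpos)]
          simp only [beq_iff_eq]
          omega
        rw [hcnt]
        have hb : (i % 2 == 0) = false := by simpa using hpar
        rw [hb]
        simp [List.getElem?_eq_getElem hiE]
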